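-- pv_equiv track=rewrite | github.com/gmacgillivray/AdventOfCode2024 | AoC_2024_Puzzle 12b.py | plot_point_next_steps
-- ===== SOURCE A (Python) =====
-- from collections import defaultdict
--
-- def plot_point_next_steps(pts):
--
--     return_graph_points = defaultdict(list)
--
--     for i in range(len(pts)):
--         label = (pts[i][0],pts[i][1])
--         return_graph_points[label] = []
--
--         for j in range(len(pts)):
--             if [pts[i][0] + 1, pts[i][1]] == pts[j] or [pts[i][0] - 1, pts[i][1]] == pts[j] or [pts[i][0], pts[i][1] + 1] == pts[j] or [pts[i][0], pts[i][1] - 1] == pts[j]: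
--                 if pts[j] not in return_graph_points[label]:
--                     return_graph_points[label].append(pts[j])
--
--     return return_graph_points
-- ===== SOURCE B (Python) =====
-- def plot_point_next_steps(pts):
--     # hash each 2-element point to its first index, then check the 4 neighbour
--     # candidates per point and order them by first index: O(n) instead of O(n^2)
--     pos = {}
--     for idx, p in enumerate(pts):
--         if len(p) == 2:
--             t = (p[0], p[1])
--             if t not in pos:
--                 pos[t] = idx
--     out = {}
--     for p in pts:
--         label = (p[0], p[1])
--         if label in out:
--             continue
--         x, y = label
--         cands = [(x + 1, y), (x - 1, y), (x, y + 1), (x, y - 1)]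
--         present = [c for c in cands if c in pos]
--         present.sort(key=lambda c: pos[c])
--         out[label] = [[c[0], c[1]] for c in present]
--     return out
-- ===== Notes on version B (the rewrite author's own statement) =====
-- stated objective: faster
-- what changed: Instead of A's nested scan over all point pairs with in-list dedup, B hashes each 2-element point to its first index once, then for each point tests only its 4 neighbour candidates against the hash and orders the hits by first index.
import Mathlib
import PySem

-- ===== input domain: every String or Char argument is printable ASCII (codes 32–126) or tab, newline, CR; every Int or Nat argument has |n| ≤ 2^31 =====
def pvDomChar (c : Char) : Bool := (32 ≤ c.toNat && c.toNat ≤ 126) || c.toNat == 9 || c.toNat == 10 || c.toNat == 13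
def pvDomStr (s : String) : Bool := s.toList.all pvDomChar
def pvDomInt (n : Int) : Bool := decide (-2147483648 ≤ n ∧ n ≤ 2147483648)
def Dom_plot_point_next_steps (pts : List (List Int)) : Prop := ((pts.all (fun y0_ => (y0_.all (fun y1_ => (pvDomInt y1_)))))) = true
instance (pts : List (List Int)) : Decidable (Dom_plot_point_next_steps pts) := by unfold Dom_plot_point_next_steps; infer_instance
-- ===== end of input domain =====

-- B replaces A's quadratic all-pairs neighbour scan by a first-index hash of the
-- 2-element points with a 4-candidate lookup per point (objective: faster).


-- ===== PORT A =====
def plot_point_next_steps (pts : List (List Int)) : List (Int × Int × List (List Int)) :=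
  let d :=
    (PySem.List.pyRange 0 (PySem.List.len pts) 1).foldl (fun d i =>
      let pi := PySem.List.pyGetD pts i []
      let label : Int × Int := (PySem.List.pyGetD pi 0 0, PySem.List.pyGetD pi 1 0)
      let d := d.insert label ([] : List (List Int))
      (PySem.List.pyRange 0 (PySem.List.len pts) 1).foldl (fun d j =>
        let pj := PySem.List.pyGetD pts j []
        if [label.1 + 1, label.2] = pj ∨ [label.1 - 1, label.2] = pj ∨
           [label.1, label.2 + 1] = pj ∨ [label.1, label.2 - 1] = pj then
          if pj ∈ d.getD label [] then d
          else d.insert label (d.getD label [] ++ [pj])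
        else d) d)
      (PySem.Dict.empty : PySem.Dict (Int × Int) (List (List Int)))
  d.items.map (fun p => (p.1.1, p.1.2, p.2))

-- ===== PORT B =====
def plot_point_next_steps_alt (pts : List (List Int)) : List (Int × Int × List (List Int)) :=
  let pos :=
    (PySem.List.enumerate pts 0).foldl (fun pos ip =>
      if PySem.List.len ip.2 == 2 then
        let t : Int × Int := (PySem.List.pyGetD ip.2 0 0, PySem.List.pyGetD ip.2 1 0)
        if pos.contains t then pos else pos.insert t ip.1
      else pos)
      (PySem.Dict.empty : PySem.Dict (Int × Int) Int)
  let out :=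
    pts.foldl (fun out p =>
      let label : Int × Int := (PySem.List.pyGetD p 0 0, PySem.List.pyGetD p 1 0)
      if out.contains label then out
      else
        let cands : List (Int × Int) :=
          [(label.1 + 1, label.2), (label.1 - 1, label.2),
           (label.1, label.2 + 1), (label.1, label.2 - 1)]
        let present := cands.filter (fun c => pos.contains c)
        let presentS := PySem.List.sorted present (fun c => pos.getD c 0) false
        out.insert label (presentS.map (fun c => [c.1, c.2])))
      (PySem.Dict.empty : PySem.Dict (Int × Int) (List (List Int)))
  out.items.map (fun p => (p.1.1, p.1.2, p.2))

-- ===== PRECONDITION & SPEC =====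
-- Pre_ excludes exactly the inputs on which Python A raises IndexError: a point with
-- fewer than two coordinates (pts[i][0] / pts[i][1] out of range).
def Pre_plot_point_next_steps (pts : List (List Int)) : Prop := ∀ p ∈ pts, 2 ≤ p.length
instance (pts : List (List Int)) : Decidable (Pre_plot_point_next_steps pts) := by unfold Pre_plot_point_next_steps; infer_instance
def pvWitness_plot_point_next_steps : List (List Int) := [[0, 0], [1, 0], [0, 1]]

def Spec_plot_point_next_steps (pts : List (List Int)) (out : List (Int × Int × List (List Int))) : Prop := out = plot_point_next_steps_alt pts
instance (pts : List (List Int)) (out : List (Int × Int × List (List Int))) : Decidable (Spec_plot_point_next_steps pts out) := by unfold Spec_plot_point_next_steps; infer_instance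

-- ===== CLAIM (what is proved, stated in full; the proofs are below) =====
def Claim_equal_plot_point_next_steps : Prop := ∀ (pts : List (List Int)), Dom_plot_point_next_steps pts → Pre_plot_point_next_steps pts → Spec_plot_point_next_steps pts (plot_point_next_steps pts)

-- ===== LEMMAS AND PROOFS =====

-- proof-side helpers
def pvPosFold (pts : List (List Int)) (s : Int) (d : PySem.Dict (Int × Int) Int) : PySem.Dict (Int × Int) Int :=
  (PySem.List.enumerate pts s).foldl (fun pos ip =>
    if PySem.List.len ip.2 == 2 then
      let t : Int × Int := (PySem.List.pyGetD ip.2 0 0, PySem.List.pyGetD ip.2 1 0)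
      if pos.contains t then pos else pos.insert t ip.1
    else pos) d

def pvPH (l : List Int) : Int × Int := (PySem.List.pyGetD l 0 0, PySem.List.pyGetD l 1 0)
def pvToL (c : Int × Int) : List Int := [c.1, c.2]
def pvCands (x y : Int) : List (Int × Int) := [(x + 1, y), (x - 1, y), (x, y + 1), (x, y - 1)]
def pvCl (x y : Int) : List (List Int) := (pvCands x y).map pvToL
def pvDictOf (F : Int × Int → List (List Int)) (s : List (Int × Int)) : PySem.Dict (Int × Int) (List (List Int)) :=
  PySem.Dict.mk (s.map (fun t => (t, F t)))
def pvFA (pts : List (List Int)) (x y : Int) : List (List Int) :=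
  PySem.Set.ofList (pts.filter (fun pj => decide ([x + 1, y] = pj ∨ [x - 1, y] = pj ∨ [x, y + 1] = pj ∨ [x, y - 1] = pj)))

lemma pv_eq_pair_iff (p : List Int) (a b : Int) :
    p = [a, b] ↔ p.length = 2 ∧ p.getD 0 0 = a ∧ p.getD 1 0 = b := by
  rcases p with _ | ⟨x, _ | ⟨y, _ | ⟨z, r⟩⟩⟩ <;> simp [List.getD]

lemma pv_key_eq (p : List Int) :
    ((PySem.List.pyGetD p 0 0, PySem.List.pyGetD p 1 0) : Int × Int) = pvPH p := rfl

lemma pv_PH_getD (p : List Int) : pvPH p = (p.getD 0 0, p.getD 1 0) := by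
  simp [pvPH, List.getD, pysem]

lemma pv_len_beq (p : List Int) : (PySem.List.len p == (2 : Int)) = decide (p.length = 2) := by
  by_cases h : p.length = 2
  · have : ((p.length : Int)) = 2 := by exact_mod_cast h
    simp [PySem.List.len_eq, h, this]
  · have : ((p.length : Int)) ≠ 2 := by exact_mod_cast h
    simp [PySem.List.len_eq, h, this]

lemma pv_pos_step (p : List Int) (rest : List (List Int)) (s : Int) (d : PySem.Dict (Int × Int) Int) :
    pvPosFold (p :: rest) s d = pvPosFold rest (s + 1)
      (if p.length = 2 then
        (if d.contains (pvPH p) then d else d.insert (pvPH p) s)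
       else d) := by
  have h0 : pvPosFold (p :: rest) s d = pvPosFold rest (s + 1)
      (if PySem.List.len p == 2 then
        (if d.contains ((PySem.List.pyGetD p 0 0, PySem.List.pyGetD p 1 0) : Int × Int) then d
         else d.insert ((PySem.List.pyGetD p 0 0, PySem.List.pyGetD p 1 0) : Int × Int) s)
       else d) := by
    rw [pvPosFold, PySem.List.enumerate_cons]; rfl
  rw [h0, pv_key_eq, pv_len_beq]
  by_cases h : p.length = 2 <;> simp [h]

lemma pv_pair_ph (p : List Int) (t : Int × Int) (hlen : p.length = 2) :
    p = [t.1, t.2] ↔ pvPH p = t := by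
  rw [pv_eq_pair_iff, pv_PH_getD]
  constructor
  · rintro ⟨-, h1, h2⟩; exact Prod.ext h1 h2
  · intro h; exact ⟨hlen, congrArg Prod.fst h, congrArg Prod.snd h⟩

lemma pv_pos_contains (pts : List (List Int)) : ∀ (s : Int) (d : PySem.Dict (Int × Int) Int) (t : Int × Int),
    (pvPosFold pts s d).contains t = (d.contains t || decide ([t.1, t.2] ∈ pts)) := by
  induction pts with
  | nil => intro s d t; simp [pvPosFold, PySem.List.enumerate]
  | cons p rest ih =>
    intro s d t
    rw [pv_pos_step, ih]
    by_cases hlen : p.length = 2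
    · by_cases hpt : p = [t.1, t.2]
      · have h2 : pvPH p = t := (pv_pair_ph p t hlen).1 hpt
        by_cases hc : d.contains (pvPH p)
        · rw [h2] at hc
          simp [hlen, hpt.symm, hc, h2]
        · simp only [hlen, if_true, hc, if_neg, Bool.not_eq_true, if_false]
          rw [PySem.Dict.contains_insert, h2]
          simp [hpt.symm]
      · have h2 : pvPH p ≠ t := fun h => hpt ((pv_pair_ph p t hlen).2 h)
        have hne : [t.1, t.2] ≠ p := fun h => hpt h.symm
        by_cases hc : d.contains (pvPH p)
        · simp [hlen, hc, hne, Ne.symm h2]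
        · have hb : (t == pvPH p) = false := by
            simp [h2.symm]
          simp [hlen, hc, hne, PySem.Dict.contains_insert, hb]
    · have hne : [t.1, t.2] ≠ p := by
        intro h; apply hlen; rw [← h]; rfl
      simp [hlen, hne]

lemma pv_pos_frozen (pts : List (List Int)) : ∀ (s : Int) (d : PySem.Dict (Int × Int) Int) (t : Int × Int),
    d.contains t = true → (pvPosFold pts s d).getD t 0 = d.getD t 0 := by
  induction pts with
  | nil => intro s d t _; simp [pvPosFold, PySem.List.enumerate]
  | cons p rest ih =>
    intro s d t ht
    rw [pv_pos_step]
    by_cases hlen : p.length = 2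
    · by_cases hc : d.contains (pvPH p)
      · simp only [hlen, if_true, hc]
        exact ih _ _ _ ht
      · simp only [hlen, if_true, hc, if_neg, Bool.not_eq_true, if_false]
        have h2 : pvPH p ≠ t := by
          intro h; rw [h] at hc; simp [ht] at hc
        rw [ih _ _ _ (by rw [PySem.Dict.contains_insert]; simp [ht])]
        exact PySem.Dict.getD_insert_of_ne _ _ _ (Ne.symm h2)
    · simp only [hlen, if_false]
      exact ih _ _ _ ht

lemma pv_pos_idx (pts : List (List Int)) : ∀ (s : Int) (d : PySem.Dict (Int × Int) Int) (t : Int × Int),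
    d.contains t = false → [t.1, t.2] ∈ pts →
    (pvPosFold pts s d).getD t 0 = s + (pts.idxOf [t.1, t.2] : Int) := by
  induction pts with
  | nil => intro s d t _ hm; simp at hm
  | cons p rest ih =>
    intro s d t hd hm
    rw [pv_pos_step]
    by_cases hpt : p = [t.1, t.2]
    · have hlen : p.length = 2 := by rw [hpt]; rfl
      have h2 : pvPH p = t := (pv_pair_ph p t hlen).1 hpt
      simp only [hlen, if_true, h2, hd, if_neg, Bool.not_eq_true, if_false]
      rw [pv_pos_frozen _ _ _ _ (by rw [PySem.Dict.contains_insert]; simp)]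
      rw [PySem.Dict.getD_insert_self]
      have : (p :: rest).idxOf [t.1, t.2] = 0 := by
        rw [← hpt]; exact List.idxOf_cons_self
      rw [this]; simp
    · have hm' : [t.1, t.2] ∈ rest := by
        rcases List.mem_cons.1 hm with h | h
        · exact absurd h.symm hpt
        · exact h
      have hb0 : (p == [t.1, t.2]) = false := by simp [hpt]
      have hidx : (p :: rest).idxOf [t.1, t.2] = rest.idxOf [t.1, t.2] + 1 := by
        simp [List.idxOf_cons, hb0]
      by_cases hlen : p.length = 2
      · have h2 : pvPH p ≠ t := fun h => hpt ((pv_pair_ph p t hlen).2 h)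
        by_cases hc : d.contains (pvPH p)
        · simp only [hlen, if_true, hc]
          rw [ih _ _ _ hd hm', hidx]; push_cast; ring
        · simp only [hlen, if_true, hc, if_neg, Bool.not_eq_true, if_false]
          have hd' : (d.insert (pvPH p) s).contains t = false := by
            rw [PySem.Dict.contains_insert]
            simp [hd, Ne.symm h2]
          rw [ih _ _ _ hd' hm', hidx]; push_cast; ring

      · simp only [hlen, if_false]
        rw [ih _ _ _ hd hm', hidx]; push_cast; ring

lemma pv_discard_sublist (s : PySem.Set (List Int)) (x : List Int) :
    (s.discard x).Sublist s := by
  simp [PySem.Set.discard]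

lemma pv_ofList_pairwise_idxOf (xs : List (List Int)) :
    (PySem.Set.ofList xs).Pairwise (fun a b => xs.idxOf a < xs.idxOf b) := by
  induction xs with
  | nil => simp [PySem.Set.ofList]
  | cons p rest ih =>
    rw [PySem.Set.ofList_cons]
    constructor
    · intro b hb
      have hbne : b ≠ p := ((PySem.Set.mem_discard _ _ _).1 hb).2
      have hb0 : (p == b) = false := by simp [Ne.symm hbne]
      simp [List.idxOf_cons_self, List.idxOf_cons, hb0]
    · have hpw := List.Pairwise.sublist (pv_discard_sublist (PySem.Set.ofList rest) p) ih
      apply hpw.imp_of_mem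
      intro a b ha hb hab
      have hane : a ≠ p := ((PySem.Set.mem_discard _ _ _).1 ha).2
      have hbne : b ≠ p := ((PySem.Set.mem_discard _ _ _).1 hb).2
      have ha0 : (p == a) = false := by simp [Ne.symm hane]
      have hb0 : (p == b) = false := by simp [Ne.symm hbne]
      simp [List.idxOf_cons, ha0, hb0]
      omega

lemma pv_filter_ofList (q : List Int → Bool) (xs : List (List Int)) :
    PySem.Set.ofList (xs.filter q) = (PySem.Set.ofList xs).filter q := by
  induction xs with
  | nil => simp [PySem.Set.ofList]
  | cons p rest ih =>
    by_cases hq : q p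
    · rw [List.filter_cons_of_pos hq, PySem.Set.ofList_cons, PySem.Set.ofList_cons,
        List.filter_cons_of_pos hq, ih]
      congr 1
      simp only [PySem.Set.discard, List.filter_filter]
      apply List.filter_congr
      intro a _
      simp [Bool.and_comm]
    · rw [List.filter_cons_of_neg hq, PySem.Set.ofList_cons, ih,
        List.filter_cons_of_neg hq]
      simp only [PySem.Set.discard, List.filter_filter]
      symm
      apply List.filter_congr
      intro a ha
      have : q a = true → a ≠ p := fun h1 h2 => hq (h2 ▸ h1)
      by_cases h1 : q a <;> simp [h1, this]

lemma pv_inner (pts : List (List Int)) (x y : Int)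
    (d : PySem.Dict (Int × Int) (List (List Int))) : ∀ (L0 : List (List Int)),
    pts.foldl (fun d pj =>
      if [x + 1, y] = pj ∨ [x - 1, y] = pj ∨ [x, y + 1] = pj ∨ [x, y - 1] = pj then
        if pj ∈ d.getD (x, y) [] then d
        else d.insert (x, y) (d.getD (x, y) [] ++ [pj])
      else d) (d.insert (x, y) L0)
    = d.insert (x, y) (pts.foldl (fun acc pj =>
        if [x + 1, y] = pj ∨ [x - 1, y] = pj ∨ [x, y + 1] = pj ∨ [x, y - 1] = pj then
          if pj ∈ acc then acc else acc ++ [pj]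
        else acc) L0) := by
  induction pts with
  | nil => intro L0; rfl
  | cons pj rest ih =>
    intro L0
    simp only [List.foldl_cons]
    by_cases hcond : [x + 1, y] = pj ∨ [x - 1, y] = pj ∨ [x, y + 1] = pj ∨ [x, y - 1] = pj
    · simp only [hcond, if_true, PySem.Dict.getD_insert_self]
      by_cases hmem : pj ∈ L0
      · simp only [hmem, if_true]
        exact ih L0
      · simp only [hmem, if_false, PySem.Dict.insert_insert_self]
        exact ih (L0 ++ [pj])
    · simp only [hcond, if_false]
      exact ih L0

lemma pv_insert_dictOf (F : Int × Int → List (List Int)) (s : List (Int × Int)) (t : Int × Int) :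
    (pvDictOf F s).insert t (F t) = pvDictOf F (PySem.Set.add s t) := by
  by_cases h : t ∈ s
  · have hc : (pvDictOf F s).contains t = true := by
      rw [pvDictOf, PySem.Dict.contains_mk]
      simp only [List.any_map, List.any_eq_true]
      exact ⟨t, h, by simp⟩
    apply PySem.Dict.ext
    rw [PySem.Dict.items_insert_of_contains _ _ hc, PySem.Set.add_of_mem h]
    show List.map _ ((s.map (fun t => (t, F t)))) = _
    rw [List.map_map]
    apply List.map_congr_left
    intro a _
    by_cases ha : a = t <;> simp [ha]
  · have hc : (pvDictOf F s).contains t = false := by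
      simp only [pvDictOf, PySem.Dict.contains_mk, List.any_map, List.any_eq_false]
      rintro ⟨a, b⟩ hab
      intro he
      exact h ((by simpa using he : (a, b) = t) ▸ hab)
    apply PySem.Dict.ext
    rw [PySem.Dict.items_insert_of_not_contains _ _ hc, PySem.Set.add_of_not_mem h]
    show (s.map (fun t => (t, F t))) ++ [(t, F t)] = (s ++ [t]).map (fun t => (t, F t))
    simp

lemma pv_contains_dictOf (F : Int × Int → List (List Int)) (s : List (Int × Int)) (t : Int × Int) :
    (pvDictOf F s).contains t = decide (t ∈ s) := by
  by_cases h : t ∈ s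
  · simp [pvDictOf, PySem.Dict.contains_mk, List.any_map, h]
  · simp only [pvDictOf, PySem.Dict.contains_mk, List.any_map, h, decide_false, List.any_eq_false]
    rintro ⟨a, b⟩ hab
    intro he
    exact h ((by simpa using he : (a, b) = t) ▸ hab)

lemma pv_foldA (pts' : List (List Int)) (F : Int × Int → List (List Int)) :
    ∀ (s : List (Int × Int)),
    pts'.foldl (fun d p => d.insert (pvPH p) (F (pvPH p))) (pvDictOf F s)
    = pvDictOf F (pts'.foldl (fun s p => PySem.Set.add s (pvPH p)) s) := by
  induction pts' with
  | nil => intro s; rfl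
  | cons p rest ih =>
    intro s
    simp only [List.foldl_cons, pv_insert_dictOf]
    exact ih _

lemma pv_foldB (pts' : List (List Int)) (F : Int × Int → List (List Int)) :
    ∀ (s : List (Int × Int)),
    pts'.foldl (fun d p => if d.contains (pvPH p) then d else d.insert (pvPH p) (F (pvPH p))) (pvDictOf F s)
    = pvDictOf F (pts'.foldl (fun s p => PySem.Set.add s (pvPH p)) s) := by
  induction pts' with
  | nil => intro s; rfl
  | cons p rest ih =>
    intro s
    simp only [List.foldl_cons, pv_contains_dictOf]
    by_cases h : pvPH p ∈ s
    · simp only [h, decide_true, if_true, PySem.Set.add_of_mem h]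
      exact ih s
    · simp only [h, decide_false, if_false, pv_insert_dictOf]
      exact ih _

lemma pv_PH_pair (a b : Int) : pvPH [a, b] = (a, b) := by
  rw [pv_PH_getD]; simp [List.getD]

lemma pv_cands_nodup (x y : Int) : (pvCands x y).Nodup := by
  simp [pvCands, Prod.ext_iff]
  omega

lemma pv_condA_iff (x y : Int) (p : List Int) :
    ([x + 1, y] = p ∨ [x - 1, y] = p ∨ [x, y + 1] = p ∨ [x, y - 1] = p) ↔ p ∈ pvCl x y := by
  simp [pvCl, pvCands, pvToL, eq_comm]

lemma pv_toL_inj (a b : Int × Int) (h : pvToL a = pvToL b) : a = b := by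
  simp [pvToL] at h
  exact Prod.ext h.1 h.2

lemma pv_PH_toL (c : Int × Int) : pvPH (pvToL c) = c := by
  cases c; exact pv_PH_pair _ _

lemma pv_toL_PH {x y : Int} (p : List Int) (hp : p ∈ pvCl x y) : pvToL (pvPH p) = p := by
  obtain ⟨c, hc, hce⟩ := List.mem_map.1 hp
  rw [← hce, pv_PH_toL]

lemma pv_core (pts : List (List Int)) (x y : Int) :
    (PySem.List.sorted
      ((pvCands x y).filter (fun c => (pvPosFold pts 0 PySem.Dict.empty).contains c))
      (fun c => (pvPosFold pts 0 PySem.Dict.empty).getD c 0) false).map pvToL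
    = pvFA pts x y := by
  have hcont : ∀ c : Int × Int, (pvPosFold pts 0 PySem.Dict.empty).contains c = decide ([c.1, c.2] ∈ pts) := by
    intro c
    rw [pv_pos_contains]
    simp [PySem.Dict.contains_empty]
  have hgetD : ∀ c : Int × Int, [c.1, c.2] ∈ pts →
      (pvPosFold pts 0 PySem.Dict.empty).getD c 0 = (pts.idxOf [c.1, c.2] : Int) := by
    intro c hc
    rw [pv_pos_idx _ _ _ _ (PySem.Dict.contains_empty _) hc]
    ring
  rw [pvFA, pv_filter_ofList]
  set condA : List Int → Bool := fun pj => decide ([x + 1, y] = pj ∨ [x - 1, y] = pj ∨ [x, y + 1] = pj ∨ [x, y - 1] = pj) with hcondA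
  set RHS := (PySem.Set.ofList pts).filter condA with hRHS
  have hRmem : ∀ p ∈ RHS, p ∈ pvCl x y ∧ p ∈ pts := by
    intro p hp
    rcases List.mem_filter.1 hp with ⟨h1, h2⟩
    refine ⟨(pv_condA_iff x y p).1 (by simpa [hcondA] using h2), ?_⟩
    exact (PySem.Set.mem_ofList _ _).1 h1
  have hRnodup : RHS.Nodup := (PySem.Set.nodup_ofList pts).filter _
  set ys := RHS.map pvPH with hys
  have hysto : ys.map pvToL = RHS := by
    rw [hys, List.map_map]
    conv_rhs => rw [(List.map_id RHS).symm]
    apply List.map_congr_left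
    intro p hp
    exact pv_toL_PH p (hRmem p hp).1
  have hyin : ∀ a : Int × Int, a ∈ ys ↔ a ∈ (pvCands x y).filter (fun c => (pvPosFold pts 0 PySem.Dict.empty).contains c) := by
    intro a
    constructor
    · intro ha
      rcases List.mem_map.1 ha with ⟨p, hp, hpa⟩
      have h1 := (hRmem p hp).1
      have h2 := (hRmem p hp).2
      have hto : pvToL a = p := by rw [← hpa]; exact pv_toL_PH p h1
      apply List.mem_filter.2
      constructor
      · have : pvToL a ∈ (pvCands x y).map pvToL := by rw [hto]; exact h1
        rcases List.mem_map.1 this with ⟨c, hc, hce⟩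
        rwa [← pv_toL_inj a c hce.symm] at hc
      · rw [hcont a]
        have : [a.1, a.2] = p := hto
        simp [this, h2]
    · intro ha
      rcases List.mem_filter.1 ha with ⟨h1, h2⟩
      rw [hcont a] at h2
      have hmem : [a.1, a.2] ∈ pts := by simpa using h2
      apply List.mem_map.2
      refine ⟨[a.1, a.2], ?_, pv_PH_pair a.1 a.2⟩
      apply List.mem_filter.2
      refine ⟨(PySem.Set.mem_ofList _ _).2 hmem, ?_⟩
      have : [a.1, a.2] ∈ pvCl x y := by
        rw [pvCl]
        exact List.mem_map.2 ⟨a, h1, rfl⟩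
      simpa [hcondA] using (pv_condA_iff x y [a.1, a.2]).2 this
  have hynodup : ys.Nodup := by
    apply List.Nodup.map_on ?_ hRnodup
    intro p hp q hq hpq
    rw [← pv_toL_PH p (hRmem p hp).1, ← pv_toL_PH q (hRmem q hq).1, hpq]
  have hpresnodup : ((pvCands x y).filter (fun c => (pvPosFold pts 0 PySem.Dict.empty).contains c)).Nodup :=
    (pv_cands_nodup x y).filter _
  have hperm : ys.Perm ((pvCands x y).filter (fun c => (pvPosFold pts 0 PySem.Dict.empty).contains c)) :=
    (List.perm_ext_iff_of_nodup hynodup hpresnodup).2 hyin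
  have hpw : ys.Pairwise (fun a b => (pvPosFold pts 0 PySem.Dict.empty).getD a 0 < (pvPosFold pts 0 PySem.Dict.empty).getD b 0) := by
    have hR : RHS.Pairwise (fun a b => pts.idxOf a < pts.idxOf b) :=
      (pv_ofList_pairwise_idxOf pts).filter _
    rw [hys, List.pairwise_map]
    apply hR.imp_of_mem
    intro p q hp hq hlt
    have h1p := pv_toL_PH p (hRmem p hp).1
    have h1q := pv_toL_PH q (hRmem q hq).1
    have e1 : [(pvPH p).1, (pvPH p).2] = p := h1p
    have e2 : [(pvPH q).1, (pvPH q).2] = q := h1q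
    rw [hgetD _ (by rw [e1]; exact (hRmem p hp).2),
        hgetD _ (by rw [e2]; exact (hRmem q hq).2), e1, e2]
    exact_mod_cast hlt
  rw [PySem.List.sorted_eq_of_perm_of_pairwise_lt _ ys _ hperm hpw]
  exact hysto

-- ===== VERDICT (by name: the statement is the Claim_ definition above) =====
def pvFB (pts : List (List Int)) (t : Int × Int) : List (List Int) :=
  (PySem.List.sorted
    ((pvCands t.1 t.2).filter (fun c => (pvPosFold pts 0 PySem.Dict.empty).contains c))
    (fun c => (pvPosFold pts 0 PySem.Dict.empty).getD c 0) false).map pvToL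

def pvStepRawA (pts : List (List Int)) (d : PySem.Dict (Int × Int) (List (List Int))) (pi : List Int) :
    PySem.Dict (Int × Int) (List (List Int)) :=
  List.foldl (fun d j =>
      if [(pvPH pi).1 + 1, (pvPH pi).2] = PySem.List.pyGetD pts j [] ∨
         [(pvPH pi).1 - 1, (pvPH pi).2] = PySem.List.pyGetD pts j [] ∨
         [(pvPH pi).1, (pvPH pi).2 + 1] = PySem.List.pyGetD pts j [] ∨
         [(pvPH pi).1, (pvPH pi).2 - 1] = PySem.List.pyGetD pts j [] then
        if PySem.List.pyGetD pts j [] ∈ d.getD (pvPH pi) [] then d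
        else d.insert (pvPH pi) (d.getD (pvPH pi) [] ++ [PySem.List.pyGetD pts j []])
      else d)
    (d.insert (pvPH pi) []) (PySem.List.pyRange 0 (pts.length : Int))

lemma pv_accfold (pts : List (List Int)) (x y : Int) :
    pts.foldl (fun acc pj =>
        if [x + 1, y] = pj ∨ [x - 1, y] = pj ∨ [x, y + 1] = pj ∨ [x, y - 1] = pj then
          if pj ∈ acc then acc else acc ++ [pj]
        else acc) []
    = pvFA pts x y := by
  have h : (fun (acc : List (List Int)) pj =>
        if [x + 1, y] = pj ∨ [x - 1, y] = pj ∨ [x, y + 1] = pj ∨ [x, y - 1] = pj then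
          if pj ∈ acc then acc else acc ++ [pj]
        else acc)
      = fun acc pj =>
        if [x + 1, y] = pj ∨ [x - 1, y] = pj ∨ [x, y + 1] = pj ∨ [x, y - 1] = pj then
          PySem.Set.add acc pj
        else acc := by
    funext acc pj
    rw [PySem.Set.add_eq_ite]
  rw [h, PySem.List.foldl_ite_eq_foldl_filter, pvFA, PySem.Set.ofList_eq_foldl]

lemma pv_stepA (pts : List (List Int)) :
    pvStepRawA pts = fun d pi => d.insert (pvPH pi) (pvFA pts (pvPH pi).1 (pvPH pi).2) := by
  funext d pi
  have h1 := PySem.List.foldl_pyRange_zero_pyGetD' pts ([] : List Int)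
    (fun d pj =>
      if [(pvPH pi).1 + 1, (pvPH pi).2] = pj ∨ [(pvPH pi).1 - 1, (pvPH pi).2] = pj ∨
         [(pvPH pi).1, (pvPH pi).2 + 1] = pj ∨ [(pvPH pi).1, (pvPH pi).2 - 1] = pj then
        if pj ∈ d.getD ((pvPH pi).1, (pvPH pi).2) [] then d
        else d.insert ((pvPH pi).1, (pvPH pi).2) (d.getD ((pvPH pi).1, (pvPH pi).2) [] ++ [pj])
      else d)
    (d.insert ((pvPH pi).1, (pvPH pi).2) [])
  have h2 := pv_inner pts (pvPH pi).1 (pvPH pi).2 d []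
  exact h1.trans (h2.trans (by rw [pv_accfold]))

lemma pv_portA (pts : List (List Int)) :
    plot_point_next_steps pts
    = (pvDictOf (fun t => pvFA pts t.1 t.2)
        (pts.foldl (fun s p => PySem.Set.add s (pvPH p)) [])).items.map (fun p => (p.1.1, p.1.2, p.2)) := by
  simp only [plot_point_next_steps, PySem.List.len_eq]
  refine Eq.trans (congrArg (fun d => PySem.Dict.items d |>.map (fun p => (p.1.1, p.1.2, p.2)))
    (PySem.List.foldl_pyRange_zero_pyGetD' pts ([] : List Int) (pvStepRawA pts) PySem.Dict.empty)) ?_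
  rw [pv_stepA]
  exact congrArg (fun d => PySem.Dict.items d |>.map (fun p => (p.1.1, p.1.2, p.2)))
    (pv_foldA pts (fun t => pvFA pts t.1 t.2) [])

lemma pv_portB (pts : List (List Int)) :
    plot_point_next_steps_alt pts
    = (pvDictOf (pvFB pts)
        (pts.foldl (fun s p => PySem.Set.add s (pvPH p)) [])).items.map (fun p => (p.1.1, p.1.2, p.2)) := by
  simp only [plot_point_next_steps_alt]
  exact congrArg (fun d => PySem.Dict.items d |>.map (fun p => (p.1.1, p.1.2, p.2)))
    (pv_foldB pts (pvFB pts) [])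

theorem plot_point_next_steps_spec : Claim_equal_plot_point_next_steps := by
  intro pts _ _
  unfold Spec_plot_point_next_steps
  rw [pv_portA, pv_portB]
  have hF : (fun t => pvFA pts t.1 t.2) = pvFB pts := by
    funext t
    rw [pvFB, pv_core pts t.1 t.2]
  rw [hF]
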